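-- pv_equiv track=rewrite | github.com/alvinswen/X-Watcher | scripts/debug_fetch.py | simulate_early_stop
-- ===== SOURCE A (Python) =====
-- def simulate_early_stop(
--     tweet_ids: list[str], existing_ids: set[str], threshold: int = 5
-- ) -> tuple[bool, int | None]:
--     """模拟 repository 的 early stop 逻辑。"""
--     consecutive = 0
--     for i, tid in enumerate(tweet_ids):
--         if tid in existing_ids:
--             consecutive += 1
--             if consecutive >= threshold:
--                 return True, i
--         else:
--             consecutive = 0
--     return False, None
-- ===== SOURCE B (Python) =====
-- def simulate_early_stop(
--     tweet_ids: list[str], existing_ids: set[str], threshold: int = 5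
-- ) -> tuple[bool, int | None]:
--     """Runs decomposition: split tweet_ids into maximal runs of same membership;
--     the answer is determined by the first run of existing ids with length >= max(threshold, 1)."""
--     need = max(threshold, 1)
--     n = len(tweet_ids)
--     start = 0
--     while start < n:
--         hit = tweet_ids[start] in existing_ids
--         end = start + 1
--         while end < n and (tweet_ids[end] in existing_ids) == hit:
--             end += 1
--         if hit and end - start >= need:
--             return True, start + need - 1
--         start = end
--     return False, None
-- ===== Notes on version B (the rewrite author's own statement) =====
-- stated objective: alternative
-- what changed: Replaces the per-element consecutive counter with a run decomposition: tweet_ids is cut into maximal runs of equal membership, and the first run of existing ids with length >= max(threshold,1) yields (True, run_start + max(threshold,1) - 1).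
import Mathlib
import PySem

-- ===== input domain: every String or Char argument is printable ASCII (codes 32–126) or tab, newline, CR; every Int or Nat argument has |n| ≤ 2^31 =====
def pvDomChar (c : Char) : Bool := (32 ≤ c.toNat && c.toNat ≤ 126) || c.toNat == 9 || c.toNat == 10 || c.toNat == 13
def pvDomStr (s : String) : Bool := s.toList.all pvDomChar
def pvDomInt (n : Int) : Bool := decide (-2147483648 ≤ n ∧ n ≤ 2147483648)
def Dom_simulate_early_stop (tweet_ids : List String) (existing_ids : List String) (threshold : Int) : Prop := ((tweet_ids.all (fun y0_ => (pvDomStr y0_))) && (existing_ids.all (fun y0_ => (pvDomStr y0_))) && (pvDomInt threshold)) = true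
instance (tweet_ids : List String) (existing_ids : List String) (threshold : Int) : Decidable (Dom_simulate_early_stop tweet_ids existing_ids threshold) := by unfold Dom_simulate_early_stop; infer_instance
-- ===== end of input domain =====

-- B replaces A's per-element consecutive counter with a run decomposition (same cost, alternative algorithm).

-- ===== PORT A =====
-- A's for-loop with the `consecutive` counter; i is the enumerate index, c the counter.
def pvLoopA (ex : List String) (t : Int) : List String → Int → Int → Bool × Option Int
  | [], _, _ => (false, none)
  | tid :: rest, i, c =>
    if ex.contains tid then
      (if c + 1 ≥ t then (true, some i)
       else pvLoopA ex t rest (i + 1) (c + 1))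
    else pvLoopA ex t rest (i + 1) 0

def simulate_early_stop (tweet_ids : List String) (existing_ids : List String) (threshold : Int) : Bool × Option Int :=
  pvLoopA existing_ids threshold tweet_ids 0 0

-- ===== PORT B =====
-- B's outer while-loop; the inner while that advances `end` is the takeWhile of the current run
-- (the continuation from tweet_ids[end:] is the matching dropWhile); `start` is the running index.
def pvLoopB (ex : List String) (need : Int) : List String → Int → Bool × Option Int
  | [], _ => (false, none)
  | tid :: rest, start =>
    let hit := ex.contains tid
    let run := rest.takeWhile (fun s => ex.contains s == hit)
    let len : Int := 1 + run.length
    if hit && decide (len ≥ need) then (true, some (start + need - 1))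
    else pvLoopB ex need (rest.dropWhile (fun s => ex.contains s == hit)) (start + len)
termination_by xs _ => xs.length
decreasing_by
  exact Nat.lt_succ_of_le (List.length_dropWhile_le _ _)

def simulate_early_stop_alt (tweet_ids : List String) (existing_ids : List String) (threshold : Int) : Bool × Option Int :=
  pvLoopB existing_ids (max threshold 1) tweet_ids 0

-- ===== PRECONDITION & SPEC =====
def Spec_simulate_early_stop (tweet_ids : List String) (existing_ids : List String) (threshold : Int) (out : Bool × Option Int) : Prop := out = simulate_early_stop_alt tweet_ids existing_ids threshold
instance (tweet_ids : List String) (existing_ids : List String) (threshold : Int) (out : Bool × Option Int) : Decidable (Spec_simulate_early_stop tweet_ids existing_ids threshold out) := by unfold Spec_simulate_early_stop; infer_instance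

-- ===== CLAIM (what is proved, stated in full; the proofs are below) =====
def Claim_equal_simulate_early_stop : Prop := ∀ (tweet_ids : List String) (existing_ids : List String) (threshold : Int), Dom_simulate_early_stop tweet_ids existing_ids threshold → Spec_simulate_early_stop tweet_ids existing_ids threshold (simulate_early_stop tweet_ids existing_ids threshold)

-- ===== LEMMAS AND PROOFS =====

-- One unfolding step of B's loop on a cons cell.
theorem pvLoopB_cons (ex : List String) (need : Int) (tid : String) (rest : List String) (start : Int) :
    pvLoopB ex need (tid :: rest) start =
      (if ex.contains tid && decide ((1 + ((rest.takeWhile (fun s => ex.contains s == ex.contains tid)).length : Int)) ≥ need)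
       then (true, some (start + need - 1))
       else pvLoopB ex need (rest.dropWhile (fun s => ex.contains s == ex.contains tid))
              (start + (1 + ((rest.takeWhile (fun s => ex.contains s == ex.contains tid)).length : Int)))) := by
  rw [pvLoopB.eq_def]

-- A run of hits too short to trigger just advances i and the counter.
theorem pvA_hits_short (ex : List String) (t : Int) (run : List String)
    (hall : ∀ s ∈ run, ex.contains s = true) :
    ∀ rest i c, (run.length : Int) + c < t →
      pvLoopA ex t (run ++ rest) i c = pvLoopA ex t rest (i + run.length) (c + run.length) := by
  induction run with
  | nil => intro rest i c _; simp [pvLoopA]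
  | cons a run ih =>
    intro rest i c hlt
    have ha : ex.contains a = true := hall a (by simp)
    simp only [List.cons_append, pvLoopA, ha, if_pos]
    have hne : ¬ c + 1 ≥ t := by
      simp only [List.length_cons] at hlt; push_cast at hlt
      have : (run.length : Int) ≥ 0 := by positivity
      omega
    rw [if_neg hne, ih (fun s hs => hall s (by simp [hs])) rest (i + 1) (c + 1)
        (by simp only [List.length_cons] at hlt; push_cast at hlt ⊢; omega)]
    congr 1 <;> (simp only [List.length_cons]; push_cast; ring)

-- A run of hits long enough to trigger returns at the max(t-c,1)-th hit.
theorem pvA_hits_long (ex : List String) (t : Int) (run : List String)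
    (hall : ∀ s ∈ run, ex.contains s = true) :
    ∀ rest i c, 1 ≤ run.length → t - c ≤ (run.length : Int) →
      pvLoopA ex t (run ++ rest) i c = (true, some (i + max (t - c) 1 - 1)) := by
  induction run with
  | nil => intro rest i c h1 _; simp at h1
  | cons a run ih =>
    intro rest i c _ hlen
    have ha : ex.contains a = true := hall a (by simp)
    simp only [List.cons_append, pvLoopA, ha, if_pos]
    by_cases htrig : c + 1 ≥ t
    · rw [if_pos htrig]
      have hmx : max (t - c) 1 = 1 := by omega
      rw [hmx]; norm_num
    · rw [if_neg htrig]
      have hrun1 : 1 ≤ run.length := by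
        simp only [List.length_cons] at hlen; push_cast at hlen
        by_contra h
        have : run.length = 0 := by omega
        rw [this] at hlen; simp at hlen; omega
      rw [ih (fun s hs => hall s (by simp [hs])) rest (i + 1) (c + 1) hrun1
          (by simp only [List.length_cons] at hlen; push_cast at hlen ⊢; omega)]
      have hmx : max (t - (c + 1)) 1 = max (t - c) 1 - 1 := by omega
      rw [hmx]
      have hx : i + 1 + (max (t - c) 1 - 1) - 1 = i + max (t - c) 1 - 1 := by ring
      rw [hx]

-- A run of misses just advances i, leaving the counter at 0.
theorem pvA_misses (ex : List String) (t : Int) (run : List String)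
    (hall : ∀ s ∈ run, ex.contains s = false) :
    ∀ rest i, pvLoopA ex t (run ++ rest) i 0 = pvLoopA ex t rest (i + run.length) 0 := by
  induction run with
  | nil => intro rest i; simp [pvLoopA]
  | cons a run ih =>
    intro rest i
    have ha : ex.contains a = false := hall a (by simp)
    simp only [List.cons_append, pvLoopA, ha, Bool.false_eq_true, if_false]
    rw [ih (fun s hs => hall s (by simp [hs])) rest (i + 1)]
    congr 1 <;> (simp only [List.length_cons]; push_cast; ring)

-- The counter is irrelevant when the next element (if any) is a miss.
theorem pvA_reset (ex : List String) (t : Int) (xs : List String) (i c : Int)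
    (hhd : ∀ d ∈ xs.head?, ex.contains d = false) :
    pvLoopA ex t xs i c = pvLoopA ex t xs i 0 := by
  cases xs with
  | nil => rfl
  | cons d ds =>
    have hd : ex.contains d = false := hhd d (by simp)
    simp only [pvLoopA, hd, Bool.false_eq_true, if_false]

-- Main equivalence of the two loops.
theorem pvLoop_eq (ex : List String) (t : Int) :
    ∀ n (xs : List String), xs.length ≤ n → ∀ i,
      pvLoopA ex t xs i 0 = pvLoopB ex (max t 1) xs i := by
  intro n
  induction n with
  | zero =>
    intro xs hlen i
    have hx : xs = [] := List.length_eq_zero_iff.mp (Nat.le_zero.mp hlen)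
    subst hx; simp [pvLoopA, pvLoopB]
  | succ n ih =>
    intro xs hlen i
    cases xs with
    | nil => simp [pvLoopA, pvLoopB]
    | cons tid rest =>
      rw [pvLoopB_cons]
      cases hcase : ex.contains tid with
      | true =>
        have hall : ∀ s ∈ tid :: rest.takeWhile (fun s => ex.contains s == true), ex.contains s = true := by
          intro s hs
          rcases List.mem_cons.mp hs with h | h
          · subst h; exact hcase
          · have hp : (ex.contains s == true) = true := List.mem_takeWhile_imp (p := fun s => ex.contains s == true) (l := rest) (x := s) h
            simpa using hp
        have hA : (tid :: rest : List String)
            = (tid :: rest.takeWhile (fun s => ex.contains s == true)) ++ rest.dropWhile (fun s => ex.contains s == true) := by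
          rw [List.cons_append, List.takeWhile_append_dropWhile]
        have hL : (((tid :: rest.takeWhile (fun s => ex.contains s == true)).length : Int))
            = 1 + ((rest.takeWhile (fun s => ex.contains s == true)).length : Int) := by
          push_cast [List.length_cons]; ring
        have hdropLe : (rest.dropWhile (fun s => ex.contains s == true)).length ≤ n := by
          have h1 := List.length_dropWhile_le (fun s => ex.contains s == true) rest
          simp only [List.length_cons] at hlen; omega
        by_cases hlong : (1 + ((rest.takeWhile (fun s => ex.contains s == true)).length : Int)) ≥ max t 1
        · rw [if_pos (by simp only [Bool.true_and, decide_eq_true_eq]; exact hlong)]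
          rw [hA, pvA_hits_long ex t _ hall _ i 0 (by simp) (by rw [hL]; omega)]
          rw [show t - 0 = t from by ring]
        · rw [if_neg (by simp only [Bool.true_and, decide_eq_true_eq]; exact hlong)]
          rw [hA, pvA_hits_short ex t _ hall _ i 0 (by rw [hL]; omega)]
          rw [pvA_reset ex t _ _ _ (by
            intro d hd
            have h0 := List.head?_dropWhile_not (fun s => ex.contains s == true) rest
            cases hh : (rest.dropWhile (fun s => ex.contains s == true)).head? with
            | none => rw [hh] at hd; simp at hd
            | some x =>
              rw [hh] at hd; simp at hd
              simp only [hh] at h0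
              rw [hd] at h0
              cases hc : ex.contains d with
              | false => rfl
              | true => rw [hc] at h0; simp at h0)]
          rw [ih _ hdropLe, hL]
      | false =>
        have hall : ∀ s ∈ tid :: rest.takeWhile (fun s => ex.contains s == false), ex.contains s = false := by
          intro s hs
          rcases List.mem_cons.mp hs with h | h
          · subst h; exact hcase
          · have hp : (ex.contains s == false) = true := List.mem_takeWhile_imp (p := fun s => ex.contains s == false) (l := rest) (x := s) h
            simpa using hp
        have hA : (tid :: rest : List String)
            = (tid :: rest.takeWhile (fun s => ex.contains s == false)) ++ rest.dropWhile (fun s => ex.contains s == false) := by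
          rw [List.cons_append, List.takeWhile_append_dropWhile]
        have hL : (((tid :: rest.takeWhile (fun s => ex.contains s == false)).length : Int))
            = 1 + ((rest.takeWhile (fun s => ex.contains s == false)).length : Int) := by
          push_cast [List.length_cons]; ring
        have hdropLe : (rest.dropWhile (fun s => ex.contains s == false)).length ≤ n := by
          have h1 := List.length_dropWhile_le (fun s => ex.contains s == false) rest
          simp only [List.length_cons] at hlen; omega
        rw [if_neg (by simp)]
        rw [hA, pvA_misses ex t _ hall _ i, ih _ hdropLe, hL]

-- ===== VERDICT (by name: the statement is the Claim_ definition above) =====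
theorem simulate_early_stop_spec : Claim_equal_simulate_early_stop := by
  intro tweet_ids existing_ids threshold _
  unfold Spec_simulate_early_stop simulate_early_stop simulate_early_stop_alt
  exact pvLoop_eq existing_ids threshold tweet_ids.length tweet_ids le_rfl 0
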